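-- pv_equiv track=rewrite | github.com/Misael-art/WinDeckHelper_RetroSDK | core/diagnostic_manager.py | _build_dependency_chain
-- ===== SOURCE A (Python) =====
-- from typing import Dict, List, Optional, Any, Tuple
--
-- def _build_dependency_chain(component: str, dependencies_map: Dict[str, List[str]]) -> List[str]:
--     """
--     Constrói cadeia completa de dependências
--
--     Args:
--         component: Componente inicial
--         dependencies_map: Mapa de dependências
--
--     Returns:
--         List[str]: Cadeia de dependências
--     """
--     chain = []
--     visited = set()
--
--     def build_chain(comp):
--         if comp in visited:
--             return
--         visited.add(comp)
--         chain.append(comp)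
--
--         for dep in dependencies_map.get(comp, []):
--             build_chain(dep)
--
--     build_chain(component)
--     return chain
-- ===== SOURCE B (Python) =====
-- from typing import Dict, List
--
-- def _build_dependency_chain(component: str, dependencies_map: Dict[str, List[str]]) -> List[str]:
--     """Iterative preorder DFS with an explicit stack (no nested recursive helper)."""
--     chain = []
--     visited = set()
--     stack = [component]
--     while stack:
--         comp = stack.pop()
--         if comp in visited:
--             continue
--         visited.add(comp)
--         chain.append(comp)
--         stack.extend(reversed(dependencies_map.get(comp, [])))
--     return chain
-- ===== Notes on version B (the rewrite author's own statement) =====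
-- stated objective: alternative
-- what changed: Replaces the nested recursive helper (closure over chain/visited) with an iterative explicit-stack DFS that pops a node, skips visited ones, and pushes its dependencies in reverse so the preorder is identical; no recursion, so no RecursionError on deep graphs.
import Mathlib
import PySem

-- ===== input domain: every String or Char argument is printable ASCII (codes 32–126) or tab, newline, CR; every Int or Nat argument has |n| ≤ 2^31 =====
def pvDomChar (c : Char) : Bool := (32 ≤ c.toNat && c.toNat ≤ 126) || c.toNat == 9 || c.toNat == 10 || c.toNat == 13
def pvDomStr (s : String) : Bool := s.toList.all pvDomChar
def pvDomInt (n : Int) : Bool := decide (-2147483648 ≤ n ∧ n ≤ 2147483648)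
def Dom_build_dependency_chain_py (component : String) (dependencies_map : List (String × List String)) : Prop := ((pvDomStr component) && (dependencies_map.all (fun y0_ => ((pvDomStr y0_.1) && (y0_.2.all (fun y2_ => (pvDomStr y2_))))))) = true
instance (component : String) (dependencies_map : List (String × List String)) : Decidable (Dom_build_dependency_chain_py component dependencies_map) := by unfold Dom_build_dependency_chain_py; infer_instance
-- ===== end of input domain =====

-- B replaces A's nested recursive helper by an iterative explicit-stack DFS with the
-- same preorder (dependencies pushed reversed, visited checked at pop time); same cost.

-- ===== PORT A =====
-- dependencies_map.get(comp, []) on the association-list dict (first-match lookup)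
def pvDepsOf (dependencies_map : List (String × List String)) (comp : String) : List String :=
  PySem.Dict.getD (PySem.Dict.mk dependencies_map) comp []

-- all name occurrences in the map (keys and dependency values), used only as a bound
def pvAllNodes (dependencies_map : List (String × List String)) : List String :=
  dependencies_map.flatMap (fun p => p.1 :: p.2)

-- literal port of A's inner recursive 'build_chain'; the state is (visited, chain).
-- fuel bounds the recursion DEPTH: every nesting level marks a previously unvisited
-- node and all nodes below the root come from pvAllNodes, so depth ≤ |pvAllNodes| + 1
-- and the 0-fuel case is never reached on any input (A's recursion always terminates).
def pvBuildChainA (dm : List (String × List String)) (fuel : Nat) (comp : String)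
    (st : PySem.Set String × List String) : PySem.Set String × List String :=
  match fuel with
  | 0 => st
  | f + 1 =>
    if PySem.Set.contains st.1 comp then st
    else
      -- 'for dep in dependencies_map.get(comp, []): build_chain(dep)'
      (pvDepsOf dm comp).foldl (fun s d => pvBuildChainA dm f d s)
        (PySem.Set.add st.1 comp, st.2 ++ [comp])
termination_by fuel

def build_dependency_chain_py (component : String) (dependencies_map : List (String × List String)) : List String :=
  (pvBuildChainA dependencies_map ((pvAllNodes dependencies_map).length + 1) component
    (PySem.Set.empty, [])).2

-- ===== PORT B =====
-- number of map nodes not yet visited: the head of B's termination measure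
def pvUnvisited (dm : List (String × List String)) (visited : PySem.Set String) : Nat :=
  ((pvAllNodes dm).filter (fun x => !(PySem.Set.contains visited x))).length

-- lemmas used by pvGoB's decreasing_by (termination of B's while loop)
lemma pv_filter_le {α : Type} (p q : α → Bool) :
    ∀ l : List α, (∀ x ∈ l, q x = true → p x = true) →
      (l.filter q).length ≤ (l.filter p).length := by
  intro l
  induction l with
  | nil => intro _; simp
  | cons a t ih =>
    intro h
    have ht := ih (fun x hx hq => h x (List.mem_cons_of_mem a hx) hq)
    cases hqa : q a
    · cases hpa : p a <;> simp [hqa, hpa] <;> omega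
    · have hp := h a List.mem_cons_self hqa
      simp [hqa, hp]; omega

lemma pv_filter_lt {α : Type} (p q : α → Bool) (a : α) :
    ∀ l : List α, (∀ x ∈ l, q x = true → p x = true) → a ∈ l → p a = true → q a = false →
      (l.filter q).length < (l.filter p).length := by
  intro l
  induction l with
  | nil => intro _ ha _ _; cases ha
  | cons b t ih =>
    intro h ha hpa hqa
    rcases List.mem_cons.mp ha with rfl | hat
    · have hle := pv_filter_le p q t (fun x hx hq => h x (List.mem_cons_of_mem _ hx) hq)
      simp [hqa, hpa]; omega
    · have hlt := ih (fun x hx hq => h x (List.mem_cons_of_mem _ hx) hq) hat hpa hqa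
      cases hqb : q b
      · cases hpb : p b <;> simp [hqb, hpb] <;> omega
      · have hpb := h b List.mem_cons_self hqb
        simp [hqb, hpb]; omega

lemma pv_contains_add (v : PySem.Set String) (c x : String) :
    PySem.Set.contains (PySem.Set.add v c) x = (PySem.Set.contains v x || x == c) := by
  have h1 := PySem.Set.contains_iff (PySem.Set.add v c) x
  have h2 := PySem.Set.contains_iff v x
  have h3 := PySem.Set.mem_add v c x
  cases ha : PySem.Set.contains (PySem.Set.add v c) x <;>
    cases hb : PySem.Set.contains v x <;> cases hc : x == c <;> simp_all

lemma pvAllNodes_cons (p : String × List String) (t : List (String × List String)) :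
    pvAllNodes (p :: t) = p.1 :: (p.2 ++ pvAllNodes t) := by
  simp [pvAllNodes]

lemma pvDepsOf_nil (c : String) : pvDepsOf [] c = [] := rfl

lemma pvDepsOf_cons (p : String × List String) (dm : List (String × List String)) (c : String) :
    pvDepsOf (p :: dm) c = if p.1 == c then p.2 else pvDepsOf dm c := by
  obtain ⟨k, v⟩ := p
  simp only [pvDepsOf, PySem.Dict.getD_eq_get?_getD, PySem.Dict.get?_mk_cons]
  split <;> rfl

lemma pvDepsOf_eq_nil_of_not_mem (dm : List (String × List String)) (c : String)
    (h : c ∉ pvAllNodes dm) : pvDepsOf dm c = [] := by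
  induction dm with
  | nil => rfl
  | cons p t ih =>
    rw [pvAllNodes_cons] at h
    rw [pvDepsOf_cons]
    have hk : (p.1 == c) = false := by
      simp only [beq_eq_false_iff_ne, ne_eq]
      intro e; exact h (by rw [e]; exact List.mem_cons_self)
    rw [hk]
    simp only [Bool.false_eq_true, if_false]
    exact ih (fun hm => h (List.mem_cons_of_mem _ (List.mem_append_right _ hm)))

lemma pvDepsOf_len_le (dm : List (String × List String)) (c : String) :
    (pvDepsOf dm c).length ≤ (pvAllNodes dm).length := by
  induction dm with
  | nil => simp [pvDepsOf_nil, pvAllNodes]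
  | cons p t ih =>
    rw [pvDepsOf_cons, pvAllNodes_cons]
    split <;> simp [List.length_append] <;> omega

lemma pvU_add_lt (dm : List (String × List String)) (v : PySem.Set String) (c : String)
    (hc : c ∈ pvAllNodes dm) (hv : PySem.Set.contains v c = false) :
    pvUnvisited dm (PySem.Set.add v c) < pvUnvisited dm v := by
  unfold pvUnvisited
  apply pv_filter_lt (fun x => !PySem.Set.contains v x)
    (fun x => !PySem.Set.contains (PySem.Set.add v c) x) c
  · intro x _ hq
    cases hvx : PySem.Set.contains v x
    · simp
    · rw [pv_contains_add, hvx] at hq; simp at hq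
  · exact hc
  · show (!PySem.Set.contains v c) = true
    rw [hv]; rfl
  · rw [pv_contains_add]; simp

lemma pvU_add_eq (dm : List (String × List String)) (v : PySem.Set String) (c : String)
    (hc : c ∉ pvAllNodes dm) :
    pvUnvisited dm (PySem.Set.add v c) = pvUnvisited dm v := by
  unfold pvUnvisited
  congr 1
  apply List.filter_congr
  intro x hx
  have hxc : (x == c) = false := by
    simp only [beq_eq_false_iff_ne, ne_eq]
    intro e; exact hc (e ▸ hx)
  rw [pv_contains_add, hxc, Bool.or_false]

lemma pvMeasure_step (dm : List (String × List String)) (visited : PySem.Set String)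
    (c : String) (rest : List String) (h : PySem.Set.contains visited c = false) :
    pvUnvisited dm (PySem.Set.add visited c) * ((pvAllNodes dm).length + 1) +
        (pvDepsOf dm c ++ rest).length
      < pvUnvisited dm visited * ((pvAllNodes dm).length + 1) + (c :: rest).length := by
  by_cases hc : c ∈ pvAllNodes dm
  · have h1 := pvU_add_lt dm visited c hc h
    have h2 := pvDepsOf_len_le dm c
    have h3 : pvUnvisited dm (PySem.Set.add visited c) + 1 ≤ pvUnvisited dm visited := h1
    have h4 := Nat.mul_le_mul_right ((pvAllNodes dm).length + 1) h3
    rw [Nat.succ_mul] at h4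
    simp only [List.length_append, List.length_cons]
    omega
  · rw [pvDepsOf_eq_nil_of_not_mem dm c hc, pvU_add_eq dm visited c hc]
    simp

-- B's while loop; the stack's top is the list head, so popping the reversed-pushed
-- dependencies yields them first to last, i.e. the new stack is deps ++ rest.
def pvGoB (dm : List (String × List String)) (stack : List String)
    (visited : PySem.Set String) (chain : List String) : List String :=
  match stack with
  | [] => chain
  | c :: rest =>
    if _h : PySem.Set.contains visited c then
      pvGoB dm rest visited chain
    else
      pvGoB dm (pvDepsOf dm c ++ rest) (PySem.Set.add visited c) (chain ++ [c])
termination_by pvUnvisited dm visited * ((pvAllNodes dm).length + 1) + stack.length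
decreasing_by
  · simp only [List.length_cons]; omega
  · exact pvMeasure_step dm visited c rest (by simpa using _h)

def build_dependency_chain_py_alt (component : String) (dependencies_map : List (String × List String)) : List String :=
  pvGoB dependencies_map [component] PySem.Set.empty []

-- ===== PRECONDITION & SPEC =====
def Spec_build_dependency_chain_py (component : String) (dependencies_map : List (String × List String)) (out : List String) : Prop := out = build_dependency_chain_py_alt component dependencies_map
instance (component : String) (dependencies_map : List (String × List String)) (out : List String) : Decidable (Spec_build_dependency_chain_py component dependencies_map out) := by unfold Spec_build_dependency_chain_py; infer_instance

-- ===== CLAIM (what is proved, stated in full; the proofs are below) =====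
def Claim_equal_build_dependency_chain_py : Prop := ∀ (component : String) (dependencies_map : List (String × List String)), Dom_build_dependency_chain_py component dependencies_map → Spec_build_dependency_chain_py component dependencies_map (build_dependency_chain_py component dependencies_map)

-- ===== LEMMAS AND PROOFS =====

lemma pvChainA_zero (dm : List (String × List String)) (comp : String)
    (st : PySem.Set String × List String) : pvBuildChainA dm 0 comp st = st := by
  rw [pvBuildChainA]

lemma pvChainA_succ (dm : List (String × List String)) (f : Nat) (comp : String)
    (st : PySem.Set String × List String) :
    pvBuildChainA dm (f + 1) comp st =
      if PySem.Set.contains st.1 comp then st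
      else (pvDepsOf dm comp).foldl (fun s d => pvBuildChainA dm f d s)
        (PySem.Set.add st.1 comp, st.2 ++ [comp]) := by
  rw [pvBuildChainA]

lemma pvGoB_nil (dm : List (String × List String)) (v : PySem.Set String) (ch : List String) :
    pvGoB dm [] v ch = ch := by
  rw [pvGoB]

lemma pvGoB_cons (dm : List (String × List String)) (c : String) (rest : List String)
    (v : PySem.Set String) (ch : List String) :
    pvGoB dm (c :: rest) v ch =
      if PySem.Set.contains v c then pvGoB dm rest v ch
      else pvGoB dm (pvDepsOf dm c ++ rest) (PySem.Set.add v c) (ch ++ [c]) := by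
  rw [pvGoB]
  by_cases hb : PySem.Set.contains v c = true <;> simp only [hb] <;> rfl

-- the visited set only grows under A's recursion
lemma pvMonoFold (dm : List (String × List String)) (f : Nat)
    (h : ∀ comp st x, x ∈ st.1 → x ∈ (pvBuildChainA dm f comp st).1) :
    ∀ (l : List String) (st : PySem.Set String × List String) (x : String),
      x ∈ st.1 → x ∈ (l.foldl (fun s d => pvBuildChainA dm f d s) st).1 := by
  intro l
  induction l with
  | nil => intro st x hx; simpa using hx
  | cons d ds ih =>
    intro st x hx
    rw [List.foldl_cons]
    exact ih _ x (h d st x hx)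

lemma pvMonoChain (dm : List (String × List String)) :
    ∀ (f : Nat) (comp : String) (st : PySem.Set String × List String) (x : String),
      x ∈ st.1 → x ∈ (pvBuildChainA dm f comp st).1 := by
  intro f
  induction f with
  | zero => intro comp st x hx; rw [pvChainA_zero]; exact hx
  | succ f ih =>
    intro comp st x hx
    rw [pvChainA_succ]
    split
    · exact hx
    · refine pvMonoFold dm f ih _ _ x ?_
      exact (PySem.Set.mem_add st.1 comp x).mpr (Or.inl hx)

lemma pvU_mono (dm : List (String × List String)) (v w : PySem.Set String)
    (h : ∀ x, x ∈ v → x ∈ w) : pvUnvisited dm w ≤ pvUnvisited dm v := by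
  unfold pvUnvisited
  apply pv_filter_le
  intro x _ hq
  cases hv : PySem.Set.contains v x
  · simp
  · exfalso
    have hxw := h x ((PySem.Set.contains_iff v x).mp hv)
    have hw := (PySem.Set.contains_iff w x).mpr hxw
    rw [hw] at hq; simp at hq

-- core invariant: running B's loop on l ++ rest first performs A's recursion on all of l
lemma pvMain (dm : List (String × List String)) :
    ∀ (f : Nat) (l rest : List String) (st : PySem.Set String × List String),
      pvUnvisited dm st.1 < f →
      pvGoB dm (l ++ rest) st.1 st.2 =
        pvGoB dm rest (l.foldl (fun s d => pvBuildChainA dm f d s) st).1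
          (l.foldl (fun s d => pvBuildChainA dm f d s) st).2 := by
  intro f
  induction f using Nat.strong_induction_on with
  | _ f ihf =>
    intro l
    induction l with
    | nil => intro rest st _; rw [List.nil_append, List.foldl_nil]
    | cons d ds ihl =>
      intro rest st hN
      obtain ⟨f', rfl⟩ : ∃ f', f = f' + 1 := ⟨f - 1, by omega⟩
      rw [List.cons_append, pvGoB_cons]
      by_cases h : PySem.Set.contains st.1 d = true
      · rw [if_pos h]
        have hA : pvBuildChainA dm (f' + 1) d st = st := by rw [pvChainA_succ, if_pos h]
        rw [List.foldl_cons, hA]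
        exact ihl rest st hN
      · rw [if_neg h]
        have hA : pvBuildChainA dm (f' + 1) d st =
            (pvDepsOf dm d).foldl (fun s e => pvBuildChainA dm f' e s)
              (PySem.Set.add st.1 d, st.2 ++ [d]) := by
          rw [pvChainA_succ, if_neg h]
        have hb : PySem.Set.contains st.1 d = false := by simpa using h
        by_cases hd : d ∈ pvAllNodes dm
        · have h1 : pvUnvisited dm (PySem.Set.add st.1 d, st.2 ++ [d]).1 < f' := by
            have := pvU_add_lt dm st.1 d hd hb
            simpa using by omega
          have e1 := ihf f' (by omega) (pvDepsOf dm d) (ds ++ rest)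
            (PySem.Set.add st.1 d, st.2 ++ [d]) h1
          rw [e1]
          have h2 : pvUnvisited dm
              ((pvDepsOf dm d).foldl (fun s e => pvBuildChainA dm f' e s)
                (PySem.Set.add st.1 d, st.2 ++ [d])).1 < f' + 1 := by
            have hmono := pvU_mono dm (PySem.Set.add st.1 d, st.2 ++ [d]).1
              ((pvDepsOf dm d).foldl (fun s e => pvBuildChainA dm f' e s)
                (PySem.Set.add st.1 d, st.2 ++ [d])).1
              (fun x hx => pvMonoFold dm f' (pvMonoChain dm f') _ _ x hx)
            omega
          have e2 := ihl rest _ h2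
          rw [e2, List.foldl_cons, hA]
        · have hdeps : pvDepsOf dm d = [] := pvDepsOf_eq_nil_of_not_mem dm d hd
          have h1 : pvUnvisited dm (PySem.Set.add st.1 d, st.2 ++ [d]).1 < f' + 1 := by
            have := pvU_add_eq dm st.1 d hd
            simpa using by omega
          have e2 := ihl rest (PySem.Set.add st.1 d, st.2 ++ [d]) h1
          rw [hdeps, List.nil_append, e2, List.foldl_cons, hA, hdeps, List.foldl_nil]

-- ===== VERDICT (by name: the statement is the Claim_ definition above) =====
theorem build_dependency_chain_py_spec : Claim_equal_build_dependency_chain_py := by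
  intro component dm _
  unfold Spec_build_dependency_chain_py build_dependency_chain_py build_dependency_chain_py_alt
  have hlt : pvUnvisited dm PySem.Set.empty < (pvAllNodes dm).length + 1 := by
    have := List.length_filter_le (fun x => !(PySem.Set.contains PySem.Set.empty x)) (pvAllNodes dm)
    unfold pvUnvisited
    omega
  have h := pvMain dm ((pvAllNodes dm).length + 1) [component] []
    (PySem.Set.empty, []) hlt
  simp only [List.append_nil, List.foldl_cons, List.foldl_nil, pvGoB_nil] at h
  exact h.symm
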